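-- pv_equiv track=rewrite | github.com/olimpiadi-informatica/scolastiche | src/fibonacci-primarie/2024-prima-fase/contest/P6-distribuisci-carote/variants.py | unduplicate
-- ===== SOURCE A (Python) =====
-- def unduplicate(correct, wrong, min=0, check=None):
--     res = []
--
--     def ok(x):
--         return x != correct and x not in res
--
--     for w in wrong:
--         ww = w
--         while not ok(ww) and ww >= min:
--             ww -= 1
--         if ww < min:
--             ww = w
--             while not ok(ww):
--                 ww += 1
--         res.append(ww)
--     return res
-- ===== SOURCE B (Python) =====
-- def unduplicate(correct, wrong, min=0, check=None):
--     # jump-pointer "next free value" maps instead of unit-step scans: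
--     # a value is used iff it is a key; following down/up pointers from x
--     # lands on the nearest free value below-or-at / above-or-at x.
--     down = {correct: correct - 1}
--     up = {correct: correct + 1}
--
--     def find(ptr, x):
--         while x in ptr:
--             x = ptr[x]
--         return x
--
--     res = []
--     for w in wrong:
--         d = find(down, w)
--         m = d if d >= min else find(up, w)
--         res.append(m)
--         down[m] = down[m - 1] if m - 1 in down else m - 1
--         up[m] = up[m + 1] if m + 1 in up else m + 1
--     return res
-- ===== Notes on version B (the rewrite author's own statement) =====
-- stated objective: faster
-- what changed: Replaces A's unit-step while-loops (each step doing an O(|res|) list membership test) with two 'nearest free value' jump-pointer dicts seeded with {correct}: a down map and an up map whose pointers skip over whole runs of already-used values, linking each newly used value to its neighbour's pointer.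
import Mathlib
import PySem

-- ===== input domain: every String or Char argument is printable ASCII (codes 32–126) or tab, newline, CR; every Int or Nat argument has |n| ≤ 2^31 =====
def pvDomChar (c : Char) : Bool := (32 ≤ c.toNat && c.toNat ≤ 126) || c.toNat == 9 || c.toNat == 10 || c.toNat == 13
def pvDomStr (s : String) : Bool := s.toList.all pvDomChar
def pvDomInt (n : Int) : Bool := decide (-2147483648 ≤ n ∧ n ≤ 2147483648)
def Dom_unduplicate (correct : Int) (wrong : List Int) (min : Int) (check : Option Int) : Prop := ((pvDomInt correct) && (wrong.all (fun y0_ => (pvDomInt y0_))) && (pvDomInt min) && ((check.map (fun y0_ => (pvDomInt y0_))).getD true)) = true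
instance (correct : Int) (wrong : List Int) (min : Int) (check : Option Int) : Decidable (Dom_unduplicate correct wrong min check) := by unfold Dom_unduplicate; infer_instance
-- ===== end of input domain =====

-- B replaces A's unit-step scans (with O(|res|) list membership at every step) by two
-- "nearest free value" jump-pointer dicts; objective: faster (constant/mechanism: dict
-- jumps instead of unit steps with list scans). Return value only; neither mutates input.

-- ===== PORT A =====
-- ok(x) = x != correct and x not in res
def pyOk (correct : Int) (res : List Int) (x : Int) : Bool :=
  x != correct && !(res.contains x)

-- while not ok(ww) and ww >= min: ww -= 1
def downScan (correct : Int) (res : List Int) (mn : Int) (ww : Int) : Int :=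
  if pyOk correct res ww = false ∧ mn ≤ ww then downScan correct res mn (ww - 1) else ww
termination_by (ww - mn + 1).toNat
decreasing_by omega

-- while not ok(ww): ww += 1   (fuel is only a totality guard; res.length + 2 always suffices)
def upScanF (correct : Int) (res : List Int) : Nat → Int → Int
  | 0, ww => ww
  | f + 1, ww => if pyOk correct res ww then ww else upScanF correct res f (ww + 1)

-- the for-loop of A, res accumulated by append exactly as in Python
def aGo (correct mn : Int) : List Int → List Int → List Int
  | res, [] => res
  | res, w :: ws =>
      let ww := downScan correct res mn w
      let ww2 := if ww < mn then upScanF correct res (res.length + 2) w else ww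
      aGo correct mn (res ++ [ww2]) ws

def unduplicate (correct : Int) (wrong : List Int) (min : Int) (check : Option Int) : List Int :=
  aGo correct min [] wrong

-- ===== PORT B =====
-- while x in ptr: x = ptr[x]   (fuel is only a totality guard; size + 1 always suffices)
def findF (ptr : PySem.Dict Int Int) : Nat → Int → Int
  | 0, x => x
  | f + 1, x =>
      match ptr.get? x with
      | none => x
      | some y => findF ptr f y

def findPtr (ptr : PySem.Dict Int Int) (x : Int) : Int :=
  findF ptr (ptr.size + 1) x

def altGo (correct mn : Int) : List Int → PySem.Dict Int Int → PySem.Dict Int Int → List Int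
  | [], _, _ => []
  | w :: ws, down, up =>
      let d := findPtr down w
      let m := if mn ≤ d then d else findPtr up w
      let down' := down.insert m ((down.get? (m - 1)).getD (m - 1))
      let up' := up.insert m ((up.get? (m + 1)).getD (m + 1))
      m :: altGo correct mn ws down' up'

def unduplicate_alt (correct : Int) (wrong : List Int) (min : Int) (check : Option Int) : List Int :=
  altGo correct min wrong
    (PySem.Dict.empty.insert correct (correct - 1))
    (PySem.Dict.empty.insert correct (correct + 1))

-- ===== PRECONDITION & SPEC =====
def Spec_unduplicate (correct : Int) (wrong : List Int) (min : Int) (check : Option Int) (out : List Int) : Prop := out = unduplicate_alt correct wrong min check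
instance (correct : Int) (wrong : List Int) (min : Int) (check : Option Int) (out : List Int) : Decidable (Spec_unduplicate correct wrong min check out) := by unfold Spec_unduplicate; infer_instance

-- ===== CLAIM (what is proved, stated in full; the proofs are below) =====
def Claim_equal_unduplicate : Prop := ∀ (correct : Int) (wrong : List Int) (min : Int) (check : Option Int), Dom_unduplicate correct wrong min check → Spec_unduplicate correct wrong min check (unduplicate correct wrong min check)

-- ===== LEMMAS AND PROOFS =====

-- x is "used": equal to correct or already chosen
def Used (correct : Int) (res : List Int) (x : Int) : Prop := x = correct ∨ x ∈ res

theorem pyOk_false_iff (correct : Int) (res : List Int) (x : Int) :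
    pyOk correct res x = false ↔ Used correct res x := by
  simp [pyOk, Used]
  tauto

theorem pyOk_true_iff (correct : Int) (res : List Int) (x : Int) :
    pyOk correct res x = true ↔ ¬ Used correct res x := by
  rw [← Bool.not_eq_false, not_iff_not, pyOk_false_iff]

-- invariant of the downward jump-pointer dict
def DInv (correct : Int) (res : List Int) (d : PySem.Dict Int Int) : Prop :=
  (∀ x, d.contains x = true ↔ Used correct res x) ∧
  (∀ x y, d.get? x = some y → y < x ∧ ∀ t, y < t → t ≤ x → Used correct res t)

-- invariant of the upward jump-pointer dict
def UInv (correct : Int) (res : List Int) (d : PySem.Dict Int Int) : Prop :=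
  (∀ x, d.contains x = true ↔ Used correct res x) ∧
  (∀ x y, d.get? x = some y → x < y ∧ ∀ t, x ≤ t → t < y → Used correct res t)

-- number of keys ≤ x (resp. ≥ x): the find measure
def keysLe (d : PySem.Dict Int Int) (x : Int) : Nat :=
  (d.keys.toFinset.filter (fun k => k ≤ x)).card

def keysGe (d : PySem.Dict Int Int) (x : Int) : Nat :=
  (d.keys.toFinset.filter (fun k => x ≤ k)).card

theorem mem_keys_of_get?_eq_some (d : PySem.Dict Int Int) (x y : Int)
    (h : d.get? x = some y) : x ∈ d.keys := by
  by_contra hx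
  rw [← PySem.Dict.get?_eq_none_iff_not_mem_keys] at hx
  simp [h] at hx

theorem keys_length_eq_size (d : PySem.Dict Int Int) : d.keys.length = d.size := by
  simp [PySem.Dict.keys, PySem.Dict.size]

theorem keysLe_le_size (d : PySem.Dict Int Int) (x : Int) : keysLe d x ≤ d.size := by
  calc (d.keys.toFinset.filter (fun k => k ≤ x)).card
      ≤ d.keys.toFinset.card := Finset.card_filter_le _ _
    _ ≤ d.keys.length := List.toFinset_card_le _
    _ = d.size := keys_length_eq_size d

theorem keysGe_le_size (d : PySem.Dict Int Int) (x : Int) : keysGe d x ≤ d.size := by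
  calc (d.keys.toFinset.filter (fun k => x ≤ k)).card
      ≤ d.keys.toFinset.card := Finset.card_filter_le _ _
    _ ≤ d.keys.length := List.toFinset_card_le _
    _ = d.size := keys_length_eq_size d

theorem findF_down_spec (correct : Int) (res : List Int) (d : PySem.Dict Int Int)
    (hI : DInv correct res d) :
    ∀ (f : Nat) (x : Int), keysLe d x < f →
      findF d f x ≤ x ∧ ¬ Used correct res (findF d f x) ∧
        (∀ t, findF d f x < t → t ≤ x → Used correct res t) := by
  intro f
  induction f with
  | zero => intro x h; omega
  | succ f ih =>
      intro x hlt
      rcases hget : d.get? x with _ | y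
      · have hc : d.contains x = false := (PySem.Dict.get?_eq_none_iff_contains d x).mp hget
        have hnu : ¬ Used correct res x := by
          intro hu
          have := (hI.1 x).mpr hu
          simp [hc] at this
        simp [findF, hget]
        exact ⟨hnu, fun t h1 h2 => absurd (h1.trans_le h2) (lt_irrefl x)⟩
      · obtain ⟨hyx, hrun⟩ := hI.2 x y hget
        have hxk : x ∈ d.keys := mem_keys_of_get?_eq_some d x y hget
        have hm : keysLe d y < f := by
          have hss : d.keys.toFinset.filter (fun k => k ≤ y) ⊂
              d.keys.toFinset.filter (fun k => k ≤ x) := by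
            constructor
            · intro k hk
              simp only [Finset.mem_filter] at hk ⊢
              exact ⟨hk.1, by omega⟩
            · intro hsub
              have := hsub (by simp [hxk] : x ∈ d.keys.toFinset.filter (fun k => k ≤ x))
              simp at this
              omega
          have := Finset.card_lt_card hss
          unfold keysLe at hlt ⊢
          omega
        obtain ⟨h1, h2, h3⟩ := ih y hm
        refine ⟨by simpa [findF, hget] using by omega, by simpa [findF, hget] using h2, ?_⟩
        intro t ht1 ht2
        simp only [findF, hget] at ht1
        by_cases hty : t ≤ y
        · exact h3 t (by simpa [findF, hget] using ht1) hty
        · exact hrun t (by omega) ht2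

theorem findF_up_spec (correct : Int) (res : List Int) (d : PySem.Dict Int Int)
    (hI : UInv correct res d) :
    ∀ (f : Nat) (x : Int), keysGe d x < f →
      x ≤ findF d f x ∧ ¬ Used correct res (findF d f x) ∧
        (∀ t, x ≤ t → t < findF d f x → Used correct res t) := by
  intro f
  induction f with
  | zero => intro x h; omega
  | succ f ih =>
      intro x hlt
      rcases hget : d.get? x with _ | y
      · have hc : d.contains x = false := (PySem.Dict.get?_eq_none_iff_contains d x).mp hget
        have hnu : ¬ Used correct res x := by
          intro hu
          have := (hI.1 x).mpr hu
          simp [hc] at this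
        simp [findF, hget]
        exact ⟨hnu, fun t h1 h2 => absurd (h2.trans_le h1) (lt_irrefl t)⟩
      · obtain ⟨hyx, hrun⟩ := hI.2 x y hget
        have hxk : x ∈ d.keys := mem_keys_of_get?_eq_some d x y hget
        have hm : keysGe d y < f := by
          have hss : d.keys.toFinset.filter (fun k => y ≤ k) ⊂
              d.keys.toFinset.filter (fun k => x ≤ k) := by
            constructor
            · intro k hk
              simp only [Finset.mem_filter] at hk ⊢
              exact ⟨hk.1, by omega⟩
            · intro hsub
              have := hsub (by simp [hxk] : x ∈ d.keys.toFinset.filter (fun k => x ≤ k))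
              simp at this
              omega
          have := Finset.card_lt_card hss
          unfold keysGe at hlt ⊢
          omega
        obtain ⟨h1, h2, h3⟩ := ih y hm
        refine ⟨by simpa [findF, hget] using by omega, by simpa [findF, hget] using h2, ?_⟩
        intro t ht1 ht2
        simp only [findF, hget] at ht2
        by_cases hty : y ≤ t
        · exact h3 t hty (by simpa [findF, hget] using ht2)
        · exact hrun t ht1 (by omega)

theorem findPtr_down_spec (correct : Int) (res : List Int) (d : PySem.Dict Int Int)
    (hI : DInv correct res d) (x : Int) :
    findPtr d x ≤ x ∧ ¬ Used correct res (findPtr d x) ∧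
      (∀ t, findPtr d x < t → t ≤ x → Used correct res t) :=
  findF_down_spec correct res d hI _ x (by have := keysLe_le_size d x; omega)

theorem findPtr_up_spec (correct : Int) (res : List Int) (d : PySem.Dict Int Int)
    (hI : UInv correct res d) (x : Int) :
    x ≤ findPtr d x ∧ ¬ Used correct res (findPtr d x) ∧
      (∀ t, x ≤ t → t < findPtr d x → Used correct res t) :=
  findF_up_spec correct res d hI _ x (by have := keysGe_le_size d x; omega)

-- A's downward scan returns r when r ≥ min, where r is the greatest free value ≤ w
theorem downScan_eq (correct : Int) (res : List Int) (mn : Int) (r : Int) (hr : mn ≤ r)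
    (hfree : ¬ Used correct res r) :
    ∀ w, r ≤ w → (∀ t, r < t → t ≤ w → Used correct res t) →
      downScan correct res mn w = r := by
  suffices h : ∀ (k : Nat) (w : Int), (w - r).toNat = k → r ≤ w →
      (∀ t, r < t → t ≤ w → Used correct res t) → downScan correct res mn w = r by
    intro w hw hrun; exact h (w - r).toNat w rfl hw hrun
  intro k
  induction k with
  | zero =>
      intro w hk hw _
      have hwr : w = r := by omega
      subst hwr
      have hnot : ¬(pyOk correct res w = false ∧ mn ≤ w) :=
        fun hc => hfree ((pyOk_false_iff correct res w).mp hc.1)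
      rw [downScan, if_neg hnot]
  | succ k ih =>
      intro w hk hw hrun
      have hwr : r < w := by omega
      have hused : Used correct res w := hrun w hwr le_rfl
      rw [downScan]
      rw [if_pos ⟨(pyOk_false_iff correct res w).mpr hused, by omega⟩]
      exact ih (w - 1) (by omega) (by omega) (fun t h1 h2 => hrun t h1 (by omega))

-- A's downward scan exits below min when every value in [min, w] is used
theorem downScan_lt (correct : Int) (res : List Int) (mn : Int)
    (w : Int) (hall : ∀ t, mn ≤ t → t ≤ w → Used correct res t) :
    downScan correct res mn w < mn := by
  suffices h : ∀ (k : Nat) (w : Int), (w - mn + 1).toNat = k →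
      (∀ t, mn ≤ t → t ≤ w → Used correct res t) → downScan correct res mn w < mn by
    exact h _ w rfl hall
  intro k
  induction k with
  | zero =>
      intro w hk _
      rw [downScan]
      rw [if_neg (by omega : ¬(pyOk correct res w = false ∧ mn ≤ w))]
      omega
  | succ k ih =>
      intro w hk hall
      have hwm : mn ≤ w := by omega
      have hused : Used correct res w := hall w hwm le_rfl
      rw [downScan]
      rw [if_pos ⟨(pyOk_false_iff correct res w).mpr hused, hwm⟩]
      exact ih (w - 1) (by omega) (fun t h1 h2 => hall t h1 (by omega))

-- A's upward scan reaches the least free value ≥ w given enough fuel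
theorem upScanF_eq (correct : Int) (res : List Int) (u : Int)
    (hfree : ¬ Used correct res u) :
    ∀ (f : Nat) (w : Int), w ≤ u → (∀ t, w ≤ t → t < u → Used correct res t) →
      (u - w).toNat < f → upScanF correct res f w = u := by
  intro f
  induction f with
  | zero => intro w _ _ h; omega
  | succ f ih =>
      intro w hw hrun hf
      by_cases hwu : w = u
      · subst hwu
        simp [upScanF, (pyOk_true_iff correct res w).mpr hfree]
      · have hused : Used correct res w := hrun w le_rfl (by omega)
        have hok : pyOk correct res w = false := (pyOk_false_iff correct res w).mpr hused
        simp only [upScanF, hok, Bool.false_eq_true, if_false]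
        exact ih (w + 1) (by omega) (fun t h1 h2 => hrun t (by omega) h2) (by omega)

-- pigeonhole: a run of used values starting at w has length ≤ res.length + 1
theorem run_short (correct : Int) (res : List Int) (w u : Int)
    (hw : w ≤ u) (hall : ∀ t, w ≤ t → t < u → Used correct res t) :
    u - w ≤ res.length + 1 := by
  have hsub : Finset.Icc w (u - 1) ⊆ (correct :: res).toFinset := by
    intro t ht
    simp only [Finset.mem_Icc] at ht
    have := hall t ht.1 (by omega)
    rcases this with h | h <;> simp [h]
  have h1 := Finset.card_le_card hsub
  rw [Int.card_Icc] at h1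
  have h2 : (correct :: res).toFinset.card ≤ (correct :: res).length :=
    List.toFinset_card_le _
  simp only [List.length_cons] at h2
  omega

theorem Used_append (correct : Int) (res : List Int) (m t : Int) :
    Used correct (res ++ [m]) t ↔ Used correct res t ∨ t = m := by
  simp [Used, List.mem_append]
  tauto

-- invariant preservation
theorem DInv_insert (correct : Int) (res : List Int) (d : PySem.Dict Int Int)
    (hI : DInv correct res d) (m : Int) (hm : ¬ Used correct res m) :
    DInv correct (res ++ [m]) (d.insert m ((d.get? (m - 1)).getD (m - 1))) := by
  constructor
  · intro x
    rw [PySem.Dict.contains_insert, Used_append]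
    constructor
    · intro h
      rcases Bool.or_eq_true_iff.mp h with h | h
      · exact Or.inr (by simpa using h)
      · exact Or.inl ((hI.1 x).mp h)
    · intro h
      rcases h with h | h
      · exact Bool.or_eq_true_iff.mpr (Or.inr ((hI.1 x).mpr h))
      · exact Bool.or_eq_true_iff.mpr (Or.inl (by simpa using h))
  · intro x y hxy
    rw [PySem.Dict.get?_insert] at hxy
    by_cases hx : x = m
    · rw [if_pos hx] at hxy
      subst hx
      have hy : y = (d.get? (x - 1)).getD (x - 1) := by
        injection hxy with h; omega
      rcases hg : d.get? (x - 1) with _ | y0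
      · rw [hg] at hy
        simp at hy
        subst hy
        exact ⟨by omega, fun t h1 h2 => (Used_append correct res x t).mpr (Or.inr (by omega))⟩
      · obtain ⟨h1, h2⟩ := hI.2 (x - 1) y0 hg
        rw [hg] at hy
        simp at hy
        subst hy
        refine ⟨by omega, fun t ht1 ht2 => ?_⟩
        by_cases htx : t = x
        · exact (Used_append correct res x t).mpr (Or.inr htx)
        · exact (Used_append correct res x t).mpr
            (Or.inl (h2 t ht1 (by omega)))
    · rw [if_neg hx] at hxy
      obtain ⟨h1, h2⟩ := hI.2 x y hxy
      exact ⟨h1, fun t ht1 ht2 =>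
        (Used_append correct res m t).mpr (Or.inl (h2 t ht1 ht2))⟩

theorem UInv_insert (correct : Int) (res : List Int) (d : PySem.Dict Int Int)
    (hI : UInv correct res d) (m : Int) (hm : ¬ Used correct res m) :
    UInv correct (res ++ [m]) (d.insert m ((d.get? (m + 1)).getD (m + 1))) := by
  constructor
  · intro x
    rw [PySem.Dict.contains_insert, Used_append]
    constructor
    · intro h
      rcases Bool.or_eq_true_iff.mp h with h | h
      · exact Or.inr (by simpa using h)
      · exact Or.inl ((hI.1 x).mp h)
    · intro h
      rcases h with h | h
      · exact Bool.or_eq_true_iff.mpr (Or.inr ((hI.1 x).mpr h))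
      · exact Bool.or_eq_true_iff.mpr (Or.inl (by simpa using h))
  · intro x y hxy
    rw [PySem.Dict.get?_insert] at hxy
    by_cases hx : x = m
    · rw [if_pos hx] at hxy
      subst hx
      have hy : y = (d.get? (x + 1)).getD (x + 1) := by
        injection hxy with h; omega
      rcases hg : d.get? (x + 1) with _ | y0
      · rw [hg] at hy
        simp at hy
        subst hy
        exact ⟨by omega, fun t h1 h2 => (Used_append correct res x t).mpr (Or.inr (by omega))⟩
      · obtain ⟨h1, h2⟩ := hI.2 (x + 1) y0 hg
        rw [hg] at hy
        simp at hy
        subst hy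
        refine ⟨by omega, fun t ht1 ht2 => ?_⟩
        by_cases htx : t = x
        · exact (Used_append correct res x t).mpr (Or.inr htx)
        · exact (Used_append correct res x t).mpr
            (Or.inl (h2 t (by omega) ht2))
    · rw [if_neg hx] at hxy
      obtain ⟨h1, h2⟩ := hI.2 x y hxy
      exact ⟨h1, fun t ht1 ht2 =>
        (Used_append correct res m t).mpr (Or.inl (h2 t ht1 ht2))⟩

-- main loop correspondence
theorem aGo_eq_altGo (correct mn : Int) :
    ∀ (ws res : List Int) (down up : PySem.Dict Int Int),
      DInv correct res down → UInv correct res up →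
      aGo correct mn res ws = res ++ altGo correct mn ws down up := by
  intro ws
  induction ws with
  | nil => intro res down up _ _; simp [aGo, altGo]
  | cons w ws ih =>
      intro res down up hD hU
      obtain ⟨hd1, hd2, hd3⟩ := findPtr_down_spec correct res down hD w
      rw [aGo, altGo]
      have hstep : (if downScan correct res mn w < mn
            then upScanF correct res (res.length + 2) w
            else downScan correct res mn w) =
          (if mn ≤ findPtr down w then findPtr down w else findPtr up w) := by
        by_cases hmd : mn ≤ findPtr down w
        · rw [downScan_eq correct res mn (findPtr down w) hmd hd2 w hd1 hd3,
            if_neg (by omega), if_pos hmd]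
        · obtain ⟨hu1, hu2, hu3⟩ := findPtr_up_spec correct res up hU w
          have hall : ∀ t, mn ≤ t → t ≤ w → Used correct res t :=
            fun t h1 h2 => hd3 t (by omega) h2
          rw [if_pos (downScan_lt correct res mn w hall), if_neg hmd]
          have hshort := run_short correct res w (findPtr up w) hu1 hu3
          exact upScanF_eq correct res (findPtr up w) hu2 (res.length + 2) w hu1 hu3
            (by omega)
      rw [hstep]
      set m := if mn ≤ findPtr down w then findPtr down w else findPtr up w with hm
      have hmfree : ¬ Used correct res m := by
        rw [hm]
        split
        · exact hd2
        · exact (findPtr_up_spec correct res up hU w).2.1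
      rw [ih (res ++ [m]) _ _ (DInv_insert correct res down hD m hmfree)
        (UInv_insert correct res up hU m hmfree)]
      simp

theorem DInv_init (correct : Int) :
    DInv correct [] (PySem.Dict.empty.insert correct (correct - 1)) := by
  constructor
  · intro x
    rw [PySem.Dict.contains_insert]
    simp [PySem.Dict.contains_empty, Used]
  · intro x y hxy
    rw [PySem.Dict.get?_insert] at hxy
    by_cases hx : x = correct
    · rw [if_pos hx] at hxy
      subst hx
      injection hxy with h
      exact ⟨by omega, fun t h1 h2 => Or.inl (by omega)⟩
    · rw [if_neg hx] at hxy
      simp [PySem.Dict.get?_empty] at hxy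

theorem UInv_init (correct : Int) :
    UInv correct [] (PySem.Dict.empty.insert correct (correct + 1)) := by
  constructor
  · intro x
    rw [PySem.Dict.contains_insert]
    simp [PySem.Dict.contains_empty, Used]
  · intro x y hxy
    rw [PySem.Dict.get?_insert] at hxy
    by_cases hx : x = correct
    · rw [if_pos hx] at hxy
      subst hx
      injection hxy with h
      exact ⟨by omega, fun t h1 h2 => Or.inl (by omega)⟩
    · rw [if_neg hx] at hxy
      simp [PySem.Dict.get?_empty] at hxy

-- ===== VERDICT (by name: the statement is the Claim_ definition above) =====
theorem unduplicate_spec : Claim_equal_unduplicate := by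
  intro correct wrong mn check _
  unfold Spec_unduplicate unduplicate unduplicate_alt
  simpa using aGo_eq_altGo correct mn wrong [] _ _ (DInv_init correct) (UInv_init correct)
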